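-- pv_equiv track=rewrite | github.com/goyalkaraniit/SymTax | per.py | unique_sort_by_frequency_with_tiebreaker
-- ===== SOURCE A (Python) =====
-- def unique_sort_by_frequency_with_tiebreaker(input_list):
--     frequency_dict = {}
--     for i, item in enumerate(input_list):
--         if item in frequency_dict:
--             frequency_dict[item][0] += 1
--         else:
--             frequency_dict[item] = [1, i]  # [Frequency, Initial Index]
--     sorted_unique_elements = sorted(frequency_dict.items(), key=lambda x: (-x[1][0], x[1][1]))
--     return [item for item, freq_index in sorted_unique_elements]
-- ===== SOURCE B (Python) =====
-- def unique_sort_by_frequency_with_tiebreaker(input_list):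
--     # Bucket (counting) sort: no comparison sort at all.  Count occurrences,
--     # group the keys (in first-occurrence order) into frequency buckets, then
--     # emit the buckets from the highest possible frequency down.
--     counts = {}
--     for x in input_list:
--         counts[x] = counts.get(x, 0) + 1
--     buckets = {}
--     for x in counts:
--         buckets.setdefault(counts[x], []).append(x)
--     result = []
--     for f in range(len(input_list), 0, -1):
--         result += buckets.get(f, [])
--     return result
-- ===== Notes on version B (the rewrite author's own statement) =====
-- stated objective: alternative
-- what changed: Replaced the comparison sort on (-frequency, first_index) tuples by a bucket (counting) sort: count occurrences, group keys in first-occurrence order into frequency buckets, and concatenate the buckets from the highest frequency down, so no comparison sort and no index bookkeeping remain.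
import Mathlib
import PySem

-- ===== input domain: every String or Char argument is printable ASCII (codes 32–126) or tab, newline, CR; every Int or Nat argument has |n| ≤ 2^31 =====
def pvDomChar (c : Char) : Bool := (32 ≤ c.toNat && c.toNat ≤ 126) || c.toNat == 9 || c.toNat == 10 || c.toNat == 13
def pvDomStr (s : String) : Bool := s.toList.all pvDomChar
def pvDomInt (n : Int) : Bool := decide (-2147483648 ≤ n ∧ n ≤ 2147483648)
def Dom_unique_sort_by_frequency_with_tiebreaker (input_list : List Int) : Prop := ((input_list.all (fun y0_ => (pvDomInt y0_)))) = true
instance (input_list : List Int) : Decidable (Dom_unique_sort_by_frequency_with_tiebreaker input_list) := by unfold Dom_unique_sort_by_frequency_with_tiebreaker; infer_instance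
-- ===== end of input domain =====

-- B replaces the comparison sort on (-frequency, first_index) tuples by a bucket
-- (counting) sort: count occurrences, group keys in first-occurrence order into
-- frequency buckets, and concatenate the buckets from the highest frequency down.


-- ===== PORT A =====
def unique_sort_by_frequency_with_tiebreaker (input_list : List Int) : List Int :=
  let frequency_dict : PySem.Dict Int (Int × Int) :=
    (PySem.List.enumerate input_list).foldl
      (fun d p =>
        if d.contains p.2 then
          -- frequency_dict[item][0] += 1  (in-place bump of the stored [freq, idx] pair)
          d.modify p.2 (0, 0) (fun v => (v.1 + 1, v.2))
        else
          d.insert p.2 (1, p.1))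
      PySem.Dict.empty
  let sorted_unique_elements :=
    PySem.List.sorted2 frequency_dict.items (fun x => -x.2.1) (fun x => x.2.2)
  sorted_unique_elements.map (fun x => x.1)

-- ===== PORT B =====
def unique_sort_by_frequency_with_tiebreaker_alt (input_list : List Int) : List Int :=
  let counts : PySem.Dict Int Int :=
    input_list.foldl (fun d x => d.insert x (d.getD x 0 + 1)) PySem.Dict.empty
  -- buckets.setdefault(counts[x], []).append(x)  =  modify with default []
  let buckets : PySem.Dict Int (List Int) :=
    counts.keys.foldl (fun b x => b.modify (counts.getD x 0) [] (fun ys => ys ++ [x])) PySem.Dict.empty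
  (PySem.List.pyRange (PySem.List.len input_list) 0 (-1)).foldl
    (fun res f => res ++ buckets.getD f []) []

-- ===== PRECONDITION & SPEC =====
def Spec_unique_sort_by_frequency_with_tiebreaker (input_list : List Int) (out : List Int) : Prop := out = unique_sort_by_frequency_with_tiebreaker_alt input_list
instance (input_list : List Int) (out : List Int) : Decidable (Spec_unique_sort_by_frequency_with_tiebreaker input_list out) := by unfold Spec_unique_sort_by_frequency_with_tiebreaker; infer_instance

-- ===== CLAIM (what is proved, stated in full; the proofs are below) =====
def Claim_equal_unique_sort_by_frequency_with_tiebreaker : Prop := ∀ (input_list : List Int), Dom_unique_sort_by_frequency_with_tiebreaker input_list → Spec_unique_sort_by_frequency_with_tiebreaker input_list (unique_sort_by_frequency_with_tiebreaker input_list)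

-- ===== LEMMAS AND PROOFS =====

-- first-match lookup in an association list with distinct keys finds the member pair
theorem pv_find_mem {β : Type} (l : List (Int × β)) (p : Int × β)
    (hnd : (l.map Prod.fst).Nodup) (hm : p ∈ l) :
    l.find? (fun q => q.1 == p.1) = some p := by
  induction l with
  | nil => cases hm
  | cons a t ih =>
    simp only [List.map_cons, List.nodup_cons] at hnd
    rcases List.mem_cons.mp hm with h | h
    · subst h; simp [List.find?]
    · have hne : ¬ (a.1 == p.1) = true := by
        intro hbeq
        have heq : a.1 = p.1 := by simpa using hbeq
        have : p.1 ∈ t.map Prod.fst := List.mem_map_of_mem h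
        exact hnd.1 (heq ▸ this)
      simp only [List.find?, hne]
      simpa [hne] using ih hnd.2 h

-- inserting with two predicates that agree between x and the accumulator's members
theorem pv_insertBy_congr {α : Type} (p q : α → α → Bool) (x : α) (acc : List α)
    (h : ∀ b ∈ acc, p x b = q x b) :
    PySem.List.insertBy p x acc = PySem.List.insertBy q x acc := by
  induction acc with
  | nil => rfl
  | cons a t ih =>
    have ha := h a (by simp)
    by_cases hb : p x a = true
    · simp [PySem.List.insertBy, hb, ha ▸ hb]
    · have : q x a = false := by rw [← ha]; simpa using hb
      simp [PySem.List.insertBy, hb, this, ih (fun b hbm => h b (by simp [hbm]))]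

-- two insertion folds coincide when the predicates agree on every compared pair
theorem pv_foldl_insertBy_congr {α : Type} (p q : α → α → Bool) :
    ∀ (xs acc : List α),
    xs.Pairwise (fun a b => p b a = q b a) →
    (∀ b ∈ acc, ∀ a ∈ xs, p a b = q a b) →
    xs.foldl (fun acc x => PySem.List.insertBy p x acc) acc
      = xs.foldl (fun acc x => PySem.List.insertBy q x acc) acc := by
  intro xs
  induction xs with
  | nil => intro acc _ _; rfl
  | cons x t ih =>
    intro acc hpw hacc
    have h1 : PySem.List.insertBy p x acc = PySem.List.insertBy q x acc :=
      pv_insertBy_congr p q x acc (fun b hb => hacc b hb x (by simp))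
    simp only [List.foldl_cons, h1]
    apply ih _ (List.pairwise_cons.mp hpw).2
    intro b hb a ha
    rcases (PySem.List.mem_insertBy q x b acc).mp hb with hbe | hbm
    · subst hbe; exact (List.pairwise_cons.mp hpw).1 a ha
    · exact hacc b hbm a (by simp [ha])

-- the lexicographic (-freq, idx) order collapses to the single key -f*(n+1)+i once
-- the indices are known to lie in [0, n)
theorem pv_key_lt (n fa ia fb ib : Int) (h1 : 0 ≤ ia) (h2 : ia < n) (h3 : 0 ≤ ib) (h4 : ib < n) :
    (-fa * (n + 1) + ia < -fb * (n + 1) + ib) ↔ (fb < fa ∨ (fa = fb ∧ ia < ib)) := by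
  constructor
  · intro hlt
    rcases lt_trichotomy fa fb with h | h | h
    · exfalso; nlinarith
    · right; exact ⟨h, by rw [h] at hlt; linarith⟩
    · left; exact h
  · rintro (h | ⟨h, h'⟩)
    · nlinarith
    · rw [h] at *; linarith

-- the invariant tying A's dict (freq, first index) to B's count dict
def pvInv (i : Int) (dA : PySem.Dict Int (Int × Int)) (dB : PySem.Dict Int Int) : Prop :=
  dB.items = dA.items.map (fun p => (p.1, p.2.1)) ∧
  dA.items.Pairwise (fun a b => a.2.2 < b.2.2) ∧
  (∀ p ∈ dA.items, 0 ≤ p.2.2 ∧ p.2.2 < i ∧ 1 ≤ p.2.1 ∧ p.2.1 ≤ i) ∧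
  (dA.items.map Prod.fst).Nodup ∧ 0 ≤ i

theorem pv_step (i : Int) (x : Int) (dA : PySem.Dict Int (Int × Int)) (dB : PySem.Dict Int Int)
    (h : pvInv i dA dB) :
    pvInv (i + 1)
      (if dA.contains x then dA.modify x (0, 0) (fun v => (v.1 + 1, v.2)) else dA.insert x (1, i))
      (dB.insert x (dB.getD x 0 + 1)) := by
  obtain ⟨hmap, hpw, hbd, hnd, hi⟩ := h
  have hkeys : dB.items.map Prod.fst = dA.items.map Prod.fst := by
    rw [hmap, List.map_map]; rfl
  have hcont : dB.contains x = dA.contains x := by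
    have h1 : (dB.items.any fun p => p.1 == x) = (dA.items.any fun p => p.1 == x) := by
      rw [hmap, List.any_map]; rfl
    simpa [PySem.Dict.contains] using h1
  by_cases hc : dA.contains x = true
  · -- existing key: both sides rewrite the matching pair in place
    obtain ⟨p, hpmem, hpeq⟩ : ∃ p ∈ dA.items, (p.1 == x) = true := by
      simpa [PySem.Dict.contains, List.any_eq] using hc
    have hpx : p.1 = x := by simpa using hpeq
    have hfindA : dA.items.find? (fun q => q.1 == x) = some p := by
      rw [← hpx]; exact pv_find_mem dA.items p hnd hpmem
    have hgA : dA.getD x (0, 0) = p.2 := by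
      simp [PySem.Dict.getD, PySem.Dict.get?, hfindA]
    have hndB : (dB.items.map Prod.fst).Nodup := by rw [hkeys]; exact hnd
    have hfindB : dB.items.find? (fun q => q.1 == x) = some (p.1, p.2.1) := by
      rw [← hpx]
      exact pv_find_mem dB.items (p.1, p.2.1) hndB (by rw [hmap]; exact List.mem_map_of_mem hpmem)
    have hgB : dB.getD x 0 = p.2.1 := by
      simp [PySem.Dict.getD, PySem.Dict.get?, hfindB]
    have hcB : dB.contains x = true := by rw [hcont]; exact hc
    -- the pair actually rewritten is p itself
    have hself : ∀ c ∈ dA.items, (c.1 == x) = true → c = p := by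
      intro c hcm hcx
      have h1 : c.1 = x := by simpa using hcx
      have hf := pv_find_mem dA.items c hnd hcm
      rw [h1, hfindA] at hf
      simpa using hf.symm
    have hAit : (dA.modify x (0, 0) (fun v => (v.1 + 1, v.2))).items
        = dA.items.map (fun q => if (q.1 == x) = true then (x, (p.2.1 + 1, p.2.2)) else q) := by
      simp only [PySem.Dict.modify, PySem.Dict.insert, hc, if_true, hgA]
    have hBit : (dB.insert x (dB.getD x 0 + 1)).items
        = dB.items.map (fun q => if (q.1 == x) = true then (x, p.2.1 + 1) else q) := by
      simp only [PySem.Dict.insert, hcB, if_true, hgB]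
    rw [if_pos hc]
    refine ⟨?_, ?_, ?_, ?_, by omega⟩
    · rw [hAit, hBit, hmap, List.map_map, List.map_map]
      apply List.map_congr_left
      intro q hq
      by_cases hqx : (q.1 == x) = true <;> simp [Function.comp, hqx]
    · rw [hAit, List.pairwise_map]
      apply hpw.imp_of_mem
      intro a b ha hb hab
      have hsnd : ∀ c, c ∈ dA.items → ((if (c.1 == x) = true then (x, (p.2.1 + 1, p.2.2)) else c) : Int × Int × Int).2.2 = c.2.2 := by
        intro c hcm
        by_cases hcx : (c.1 == x) = true
        · rw [if_pos hcx, hself c hcm hcx]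
        · rw [if_neg hcx]
      rw [hsnd a ha, hsnd b hb]; exact hab
    · intro q hq
      rw [hAit] at hq
      rcases List.mem_map.mp hq with ⟨c, hcm, rfl⟩
      by_cases hcx : (c.1 == x) = true
      · have hpi := hbd p hpmem
        rw [if_pos hcx]
        show 0 ≤ p.2.2 ∧ p.2.2 < i + 1 ∧ 1 ≤ p.2.1 + 1 ∧ p.2.1 + 1 ≤ i + 1
        omega
      · have := hbd c hcm
        rw [if_neg hcx]
        omega
    · rw [hAit]
      have hsame : (dA.items.map (fun q => if (q.1 == x) = true then (x, (p.2.1 + 1, p.2.2)) else q)).map Prod.fst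
          = dA.items.map Prod.fst := by
        rw [List.map_map]
        apply List.map_congr_left
        intro q _
        by_cases hqx : (q.1 == x) = true
        · have h1 : q.1 = x := by simpa using hqx
          simp [Function.comp, h1]
        · simp [Function.comp, hqx]
      rw [hsame]; exact hnd
  · -- new key: both sides append
    have hcA : dA.contains x = false := by simpa using hc
    have hcB : dB.contains x = false := by rw [hcont]; exact hcA
    have hnomem : ∀ q ∈ dB.items, ¬ (q.1 == x) = true := by
      intro q hq hqx
      have hcon : dB.contains x = true := by
        simp only [PySem.Dict.contains, List.any_eq_true]
        exact ⟨q, hq, hqx⟩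
      rw [hcB] at hcon; cases hcon
    have hnomemA : ∀ q ∈ dA.items, ¬ (q.1 == x) = true := by
      intro q hq hqx
      have hcon : dA.contains x = true := by
        simp only [PySem.Dict.contains, List.any_eq_true]
        exact ⟨q, hq, hqx⟩
      rw [hcA] at hcon; cases hcon
    have hgB : dB.getD x 0 = 0 := by
      have hfn : dB.items.find? (fun q => q.1 == x) = none := by
        rw [List.find?_eq_none]
        exact hnomem
      simp [PySem.Dict.getD, PySem.Dict.get?, hfn]
    have hAit : (dA.insert x (1, i)).items = dA.items ++ [(x, (1, i))] := by
      simp only [PySem.Dict.insert, hcA, Bool.false_eq_true, if_false]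
    have hBit : (dB.insert x (dB.getD x 0 + 1)).items = dB.items ++ [(x, 1)] := by
      simp only [PySem.Dict.insert, hcB, Bool.false_eq_true, if_false, hgB]
      norm_num
    rw [if_neg (by simpa using hc)]
    refine ⟨?_, ?_, ?_, ?_, by omega⟩
    · rw [hAit, hBit, hmap]; simp
    · rw [hAit, List.pairwise_append]
      exact ⟨hpw, by simp, fun a ha b hb => by
        simp only [List.mem_singleton] at hb; subst hb; exact (hbd a ha).2.1⟩
    · intro q hq
      rw [hAit] at hq
      rcases List.mem_append.mp hq with h1 | h1
      · have := hbd q h1; omega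
      · simp only [List.mem_singleton] at h1; subst h1
        show 0 ≤ i ∧ i < i + 1 ∧ 1 ≤ (1 : Int) ∧ (1 : Int) ≤ i + 1
        omega
    · rw [hAit, List.map_append, List.nodup_append]
      refine ⟨hnd, by simp, ?_⟩
      intro a ha b hb
      simp only [List.map_cons, List.map_nil, List.mem_singleton] at hb; subst hb
      rcases List.mem_map.mp ha with ⟨q, hq, rfl⟩
      intro he
      exact hnomemA q hq (by simpa using he)

theorem pv_fold_inv :
    ∀ (xs : List Int) (i : Int) (dA : PySem.Dict Int (Int × Int)) (dB : PySem.Dict Int Int),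
    pvInv i dA dB →
    pvInv (i + xs.length)
      ((PySem.List.enumerate xs i).foldl
        (fun d p => if d.contains p.2 then d.modify p.2 (0, 0) (fun v => (v.1 + 1, v.2))
                    else d.insert p.2 (1, p.1)) dA)
      (xs.foldl (fun d x => d.insert x (d.getD x 0 + 1)) dB) := by
  intro xs
  induction xs with
  | nil => intro i dA dB h; simpa [PySem.List.enumerate] using h
  | cons x t ih =>
    intro i dA dB h
    have := ih (i + 1) _ _ (pv_step i x dA dB h)
    simp only [PySem.List.enumerate, List.foldl_cons, List.length_cons] at this ⊢
    have harith : i + 1 + (t.length : Int) = i + ((t.length : Int) + 1) := by ring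
    rwa [harith] at this

-- range(n, 0, -1) is n, n-1, …, 1
theorem pv_pyRange_down (n : Int) :
    PySem.List.pyRange n 0 (-1) = (List.range n.toNat).map (fun k : Nat => n - (k : Int)) := by
  by_cases hn : (0 : Int) < n
  · simp only [PySem.List.pyRange, if_neg (by norm_num : ¬((-1 : Int) = 0)),
      if_neg (by norm_num : ¬(0 : Int) < -1), if_pos hn]
    have hc : ((n - 0 + -(-1) - 1) / -(-1)) = n := by norm_num
    rw [hc]
    apply List.map_congr_left
    intro k _
    ring
  · have h0 : n.toNat = 0 := by omega
    simp [PySem.List.pyRange, hn, h0]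

-- concatenating the filters over a list of values covering every g-image is a permutation
theorem pv_flatMap_filter_perm {α : Type} (g : α → Int) :
    ∀ (fs : List Int) (l : List α), fs.Nodup → (∀ p ∈ l, g p ∈ fs) →
    (fs.flatMap (fun f => l.filter (fun p => g p == f))).Perm l := by
  intro fs
  induction fs with
  | nil =>
    intro l _ hall
    have : l = [] := List.eq_nil_iff_forall_not_mem.mpr (fun x hx => by simpa using hall x hx)
    simp [this]
  | cons f rest ih =>
    intro l hnd hall
    have hfnm : f ∉ rest := (List.nodup_cons.mp hnd).1
    have hsub : ∀ f' ∈ rest,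
        l.filter (fun p => g p == f') = (l.filter (fun p => !(g p == f))).filter (fun p => g p == f') := by
      intro f' hf'
      rw [List.filter_filter]
      apply List.filter_congr
      intro x _
      by_cases hgx : g x = f'
      · have hne : f' ≠ f := fun h => hfnm (h ▸ hf')
        simp [hgx, hne]
      · simp [hgx]
    have h2 : rest.flatMap (fun f' => l.filter (fun p => g p == f'))
        = rest.flatMap (fun f' => (l.filter (fun p => !(g p == f))).filter (fun p => g p == f')) := by
      rw [List.flatMap_def, List.flatMap_def]
      congr 1
      exact List.map_congr_left hsub
    have hall' : ∀ p ∈ l.filter (fun p => !(g p == f)), g p ∈ rest := by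
      intro p hp
      rcases List.mem_filter.mp hp with ⟨hpl, hpf⟩
      have := hall p hpl
      rcases List.mem_cons.mp this with h | h
      · exfalso; simp [h] at hpf
      · exact h
    have hperm := ih (l.filter (fun p => !(g p == f))) (List.nodup_cons.mp hnd).2 hall'
    rw [List.flatMap_cons, h2]
    exact (List.Perm.append_left _ hperm).trans (List.filter_append_perm _ l)

-- ===== VERDICT (by name: the statement is the Claim_ definition above) =====
theorem unique_sort_by_frequency_with_tiebreaker_spec : Claim_equal_unique_sort_by_frequency_with_tiebreaker := by
  intro input_list _
  unfold Spec_unique_sort_by_frequency_with_tiebreaker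
  unfold unique_sort_by_frequency_with_tiebreaker unique_sort_by_frequency_with_tiebreaker_alt
  dsimp only
  set n : Int := (input_list.length : Int) with hn
  set dA : PySem.Dict Int (Int × Int) := (PySem.List.enumerate input_list 0).foldl
    (fun d p => if d.contains p.2 then d.modify p.2 ((0 : Int), (0 : Int)) (fun v => (v.1 + 1, v.2))
                else d.insert p.2 ((1 : Int), p.1)) PySem.Dict.empty with hdA
  set dB : PySem.Dict Int Int := input_list.foldl (fun d x => d.insert x (d.getD x (0 : Int) + 1)) PySem.Dict.empty with hdB
  have hinv : pvInv n dA dB := by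
    have h := pv_fold_inv input_list 0 PySem.Dict.empty PySem.Dict.empty
      (by refine ⟨rfl, ?_, ?_, ?_, le_refl 0⟩ <;> simp [PySem.Dict.empty])
    simpa using h
  obtain ⟨hmap, hpw, hbd, hnd, -⟩ := hinv
  set l : List (Int × Int × Int) := dA.items with hl
  -- B's count lookup agrees with the frequency component of A's dict
  have hndB : (dB.items.map Prod.fst).Nodup := by
    rw [hmap, List.map_map]; exact hnd
  have hgD : ∀ p ∈ l, dB.getD p.1 0 = p.2.1 := by
    intro p hp
    have := pv_find_mem dB.items (p.1, p.2.1) hndB (by rw [hmap]; exact List.mem_map_of_mem hp)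
    simp [PySem.Dict.getD, PySem.Dict.get?, this]
  have hkeys : dB.keys = l.map Prod.fst := by
    simp only [PySem.Dict.keys]; rw [hmap, List.map_map]; rfl
  -- B's bucket f is exactly the keys of frequency f, in first-occurrence order
  have hbucket : ∀ f : Int,
      (dB.keys.foldl (fun b x => b.modify (dB.getD x 0) [] (fun ys => ys ++ [x])) PySem.Dict.empty).getD f []
        = (l.filter (fun p => p.2.1 == f)).map Prod.fst := by
    intro f
    have h1 : dB.keys.foldl (fun b x => b.modify (dB.getD x 0) [] (fun ys => ys ++ [x])) PySem.Dict.empty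
        = (dB.keys.map (fun x => (dB.getD x 0, x))).foldl
            (fun d p => d.modify p.1 [] (fun ys => ys ++ [p.2])) PySem.Dict.empty := by
      rw [List.foldl_map]
    rw [h1, PySem.Dict.getD_foldl_modify_append, PySem.Dict.getD_empty, List.filter_map,
      List.map_map]
    have h2 : ((fun p => p.1 == f) ∘ (fun x => (dB.getD x 0, x))) = fun x => dB.getD x 0 == f := rfl
    have h3 : ((fun (x : Int × Int) => x.2) ∘ (fun x : Int => (dB.getD x 0, x))) = id := rfl
    rw [h2, h3, List.map_id, List.nil_append, hkeys, List.filter_map]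
    rw [show ((fun k => dB.getD k 0 == f) ∘ Prod.fst) = fun p : Int × Int × Int => dB.getD p.1 0 == f from rfl]
    congr 1
    apply List.filter_congr
    intro p hp
    rw [hgD p hp]
  -- the output loop concatenates the buckets from n down to 1
  have hfold := PySem.List.foldl_append_eq_flatMap
    (fun f => (dB.keys.foldl (fun b x => b.modify (dB.getD x 0) [] (fun ys => ys ++ [x])) PySem.Dict.empty).getD f [])
    (PySem.List.pyRange n 0 (-1)) []
  rw [PySem.List.len_eq, ← hn, hfold, List.nil_append]
  -- replace each bucket by the filtered key list and pull the map out of the flatMap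
  have hbmap : (PySem.List.pyRange n 0 (-1)).flatMap
      (fun f => (dB.keys.foldl (fun b x => b.modify (dB.getD x 0) [] (fun ys => ys ++ [x])) PySem.Dict.empty).getD f [])
      = ((PySem.List.pyRange n 0 (-1)).flatMap (fun f => l.filter (fun p => p.2.1 == f))).map Prod.fst := by
    rw [List.map_flatMap]
    rw [List.flatMap_def, List.flatMap_def]
    congr 1
    exact List.map_congr_left (fun f _ => hbucket f)
  rw [hbmap]
  -- now compare A's sort with the bucket concatenation, both over l
  set fs : List Int := PySem.List.pyRange n 0 (-1) with hfs
  set ys : List (Int × Int × Int) := fs.flatMap (fun f => l.filter (fun p => p.2.1 == f)) with hys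
  -- facts about fs = [n, n-1, …, 1]
  have hfsrep : fs = (List.range n.toNat).map (fun k : Nat => n - (k : Int)) := pv_pyRange_down n
  have hfsmem : ∀ f : Int, f ∈ fs ↔ 1 ≤ f ∧ f ≤ n := by
    intro f
    rw [hfsrep]
    constructor
    · intro hf
      rcases List.mem_map.mp hf with ⟨k, hk, rfl⟩
      have := List.mem_range.mp hk
      omega
    · intro hf
      refine List.mem_map.mpr ⟨(n - f).toNat, List.mem_range.mpr (by omega), by omega⟩
  have hfsnd : fs.Nodup := by
    rw [hfsrep]
    exact List.nodup_range.map (fun a b h => by omega)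
  have hfsdesc : fs.Pairwise (fun a b => b < a) := by
    rw [hfsrep, List.pairwise_map]
    exact List.pairwise_lt_range.imp_of_mem (fun _ _ h => by omega)
  -- ys is a permutation of l …
  have hperm : ys.Perm l := by
    apply pv_flatMap_filter_perm (fun p => p.2.1) fs l hfsnd
    intro p hp
    have := hbd p hp
    exact (hfsmem p.2.1).mpr (by omega)
  -- … that is strictly increasing in the collapsed key
  have hyspw : ys.Pairwise (fun a b =>
      (-a.2.1 * (n + 1) + a.2.2) < (-b.2.1 * (n + 1) + b.2.2)) := by
    rw [hys, List.pairwise_flatMap]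
    constructor
    · intro f _
      apply (hpw.filter _).imp_of_mem
      intro a b ha hb hab
      rcases List.mem_filter.mp ha with ⟨hal, haf⟩
      rcases List.mem_filter.mp hb with ⟨hbl, hbf⟩
      have hba := hbd a hal
      have hbb := hbd b hbl
      have haf' : a.2.1 = f := by simpa using haf
      have hbf' : b.2.1 = f := by simpa using hbf
      exact (pv_key_lt n a.2.1 a.2.2 b.2.1 b.2.2 hba.1 hba.2.1 hbb.1 hbb.2.1).mpr
        (Or.inr ⟨by omega, hab⟩)
    · apply hfsdesc.imp_of_mem
      intro f1 f2 _ _ h12 x hx y hy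
      rcases List.mem_filter.mp hx with ⟨hxl, hxf⟩
      rcases List.mem_filter.mp hy with ⟨hyl, hyf⟩
      have hbx := hbd x hxl
      have hby := hbd y hyl
      have hxf' : x.2.1 = f1 := by simpa using hxf
      have hyf' : y.2.1 = f2 := by simpa using hyf
      exact (pv_key_lt n x.2.1 x.2.2 y.2.1 y.2.2 hbx.1 hbx.2.1 hby.1 hby.2.1).mpr
        (Or.inl (by omega))
  -- A's two-key sort collapses to a single-key sort, which ys names
  have hsorted2 : PySem.List.sorted2 l (fun x => -x.2.1) (fun x => x.2.2)
      = PySem.List.sorted l (fun p => -p.2.1 * (n + 1) + p.2.2) := by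
    rw [PySem.List.sorted_eq_foldl_insertBy]
    show l.foldl (fun acc x => PySem.List.insertBy
        (fun a b => decide ((fun x : Int × Int × Int => -x.2.1) a < (fun x : Int × Int × Int => -x.2.1) b)
          || (!decide ((fun x : Int × Int × Int => -x.2.1) b < (fun x : Int × Int × Int => -x.2.1) a)
              && decide ((fun x : Int × Int × Int => x.2.2) a < (fun x : Int × Int × Int => x.2.2) b))) x acc) [] = _
    apply pv_foldl_insertBy_congr
    · apply List.pairwise_of_forall_mem_list
      intro a ha b hb
      have hba := hbd b hb
      have hbb := hbd a ha
      have hiff : ((-b.2.1 < -a.2.1) ∨ (¬(-a.2.1 < -b.2.1) ∧ b.2.2 < a.2.2))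
          ↔ (-b.2.1 * (n + 1) + b.2.2 < -a.2.1 * (n + 1) + a.2.2) := by
        rw [pv_key_lt n b.2.1 b.2.2 a.2.1 a.2.2 hba.1 hba.2.1 hbb.1 hbb.2.1]
        constructor <;> intro h <;> rcases h with h | ⟨h1, h2⟩
        · left; omega
        · rcases lt_trichotomy a.2.1 b.2.1 with h | h | h
          · left; omega
          · right; exact ⟨h.symm, h2⟩
          · omega
        · left; omega
        · right; exact ⟨by omega, h2⟩
      calc (decide (-b.2.1 < -a.2.1) || (!decide (-a.2.1 < -b.2.1) && decide (b.2.2 < a.2.2)))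
          = decide ((-b.2.1 < -a.2.1) ∨ (¬(-a.2.1 < -b.2.1) ∧ b.2.2 < a.2.2)) := by
            simp [← decide_not]
        _ = decide (-b.2.1 * (n + 1) + b.2.2 < -a.2.1 * (n + 1) + a.2.2) :=
            decide_eq_decide.mpr hiff
    · intro b hb; cases hb
  rw [hsorted2,
    PySem.List.sorted_eq_of_perm_of_pairwise_lt l ys (fun p => -p.2.1 * (n + 1) + p.2.2) hperm hyspw]
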